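-- pv_equiv track=rewrite | github.com/jan25/code_sorted | leetcode/weekly158/4_eq_freq.py | f
-- ===== SOURCE A (Python) =====
-- def f(co, c, l):
--     if c == 1 and l == co[1]: return True
--     if 1 not in co or co[1] != 1: return False
--     if (l - 1) in co and co[l - 1] * (l - 1) == l - 1:
--         return True
--     for a in range(2, l):
--         if a * a >= l: break
--         if (l - 1) % a > 0: continue
--         i, j = a, (l - 1) // a
--         if i in co and i * co[i] == (l - 1):
--             return True
--         if j in co and j * co[j] == (l - 1):
--             return True
--     return False
-- ===== SOURCE B (Python) =====
-- def f(co, c, l):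
--     if c == 1 and l == co[1]:
--         return True
--     if co.get(1) != 1:
--         return False
--     if (l - 1) in co and co[l - 1] * (l - 1) == l - 1:
--         return True
--     if l <= 2:
--         return False
--     return any(k >= 2 and (l - 1) % k == 0 and k * co[k] == l - 1 for k in co)
-- ===== Notes on version B (the rewrite author's own statement) =====
-- stated objective: alternative
-- what changed: The divisor-enumeration loop over range(2, sqrt(l)) with complement pairs is replaced by a single pass over the frequencies actually present in co, testing each key k>=2 for k | l-1 and k*co[k] == l-1; the first two guards and the l-1 guard stay.
import Mathlib
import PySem

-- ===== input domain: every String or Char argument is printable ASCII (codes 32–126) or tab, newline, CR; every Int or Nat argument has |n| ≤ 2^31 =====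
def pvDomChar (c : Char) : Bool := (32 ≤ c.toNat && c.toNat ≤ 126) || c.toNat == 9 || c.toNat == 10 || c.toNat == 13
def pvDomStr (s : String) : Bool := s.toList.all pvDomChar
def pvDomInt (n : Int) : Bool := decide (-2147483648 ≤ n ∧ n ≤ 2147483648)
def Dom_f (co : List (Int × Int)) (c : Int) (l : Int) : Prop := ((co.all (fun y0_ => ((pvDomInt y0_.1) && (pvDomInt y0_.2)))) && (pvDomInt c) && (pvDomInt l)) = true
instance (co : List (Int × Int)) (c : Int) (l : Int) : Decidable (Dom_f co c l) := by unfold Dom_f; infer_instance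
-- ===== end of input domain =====

-- B replaces A's divisor-enumeration loop by a single pass over the keys present in co (alternative shape, similar cost).

-- ===== PORT A =====
-- dict lookup co[k] / 'k in co': first match in the association list (type convention)
def dget (co : List (Int × Int)) (k : Int) : Option Int := co.lookup k

-- 'k in co and k * co[k] == l - 1' (shared shape of A's two in-loop tests and B's key test)
def chk (co : List (Int × Int)) (l : Int) (k : Int) : Bool :=
  match dget co k with
  | some v => k * v == l - 1
  | none => false

-- the 'for a in range(2, l)' loop of A, with its break / continue / returns
def fLoop (co : List (Int × Int)) (l : Int) : List Int → Bool
  | [] => false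
  | a :: rest =>
    if a * a ≥ l then false
    else if PySem.Int.mod (l - 1) a > 0 then fLoop co l rest
    else if chk co l a then true
    else if chk co l (PySem.Int.floordiv (l - 1) a) then true
    else fLoop co l rest

def f (co : List (Int × Int)) (c : Int) (l : Int) : Bool :=
  -- 'l == co[1]' in guard 1: KeyError when 1 ∉ co; that case is excluded by Pre_f, getD 0 is a total stand-in
  if c == 1 && l == (dget co 1).getD 0 then true
  else if !(dget co 1 == some 1) then false
  else if (match dget co (l - 1) with | some v => v * (l - 1) == l - 1 | none => false) then true
  else fLoop co l (PySem.List.pyRange 2 l 1)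

-- ===== PORT B =====
def f_alt (co : List (Int × Int)) (c : Int) (l : Int) : Bool :=
  if c == 1 && l == (dget co 1).getD 0 then true   -- guard 1 kept verbatim (same KeyError case, excluded by Pre_f)
  else if !(dget co 1 == some 1) then false        -- co.get(1) != 1
  else if (match dget co (l - 1) with | some v => v * (l - 1) == l - 1 | none => false) then true
  else if l ≤ 2 then false
  else (co.map Prod.fst).any (fun k => decide (2 ≤ k) && (PySem.Int.mod (l - 1) k == 0) && chk co l k)

-- ===== PRECONDITION & SPEC =====
-- Pre_f excludes exactly the inputs where A raises KeyError at guard 1 (c == 1 with key 1 absent); B raises there too.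
def Pre_f (co : List (Int × Int)) (c : Int) (l : Int) : Prop := c = 1 → 1 ∈ co.map Prod.fst
instance (co : List (Int × Int)) (c : Int) (l : Int) : Decidable (Pre_f co c l) := by unfold Pre_f; infer_instance
def pvWitness_f : (List (Int × Int)) × Int × Int := ([(1, 1), (2, 2)], 0, 5)

def Spec_f (co : List (Int × Int)) (c : Int) (l : Int) (out : Bool) : Prop := out = f_alt co c l
instance (co : List (Int × Int)) (c : Int) (l : Int) (out : Bool) : Decidable (Spec_f co c l out) := by unfold Spec_f; infer_instance

-- ===== CLAIM (what is proved, stated in full; the proofs are below) =====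
def Claim_equal_f : Prop := ∀ (co : List (Int × Int)) (c : Int) (l : Int), Dom_f co c l → Pre_f co c l → Spec_f co c l (f co c l)

-- ===== LEMMAS AND PROOFS =====

theorem lookup_mem {co : List (Int × Int)} {k v : Int} (h : co.lookup k = some v) :
    k ∈ co.map Prod.fst := by
  induction co with
  | nil => simp [List.lookup] at h
  | cons p rest ih =>
    rw [List.lookup] at h
    by_cases hk : k == p.1
    · simp at hk; simp [hk]
    · rw [Bool.not_eq_true] at hk
      rw [hk] at h
      simp [ih h]

theorem chk_mem {co : List (Int × Int)} {l k : Int} (h : chk co l k = true) :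
    k ∈ co.map Prod.fst := by
  unfold chk dget at h
  cases hl : co.lookup k with
  | none => rw [hl] at h; simp at h
  | some v => exact lookup_mem hl

-- break on the increasing range is harmless: fLoop over range(a, l) is an 'any'
theorem fLoop_eq_any (co : List (Int × Int)) (l : Int) :
    ∀ n : Nat, ∀ a : Int, (l - a).toNat ≤ n → 2 ≤ a →
      fLoop co l (PySem.List.pyRange a l 1)
        = (PySem.List.pyRange a l 1).any
            (fun x => decide (x * x < l) && (PySem.Int.mod (l - 1) x == 0)
              && (chk co l x || chk co l (PySem.Int.floordiv (l - 1) x))) := by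
  intro n
  induction n with
  | zero =>
    intro a hn _
    rw [PySem.List.pyRange_one_eq_nil (by omega)]
    rfl
  | succ n ih =>
    intro a hn ha
    by_cases hal : a < l
    · rw [PySem.List.pyRange_one_cons hal]
      by_cases h1 : a * a ≥ l
      · -- break: everything from a on has x*x ≥ l
        have hfalse : ∀ x ∈ PySem.List.pyRange a l 1,
            (decide (x * x < l) && (PySem.Int.mod (l - 1) x == 0)
              && (chk co l x || chk co l (PySem.Int.floordiv (l - 1) x))) = false := by
          intro x hx
          have hax : a ≤ x ∧ x < l := (PySem.List.mem_pyRange_one).mp hx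
          have hxx : l ≤ x * x := by nlinarith [hax.1, ha]
          simp [show ¬ (x * x < l) by omega]
        have hhead := hfalse a (by rw [PySem.List.pyRange_one_cons hal]; exact List.mem_cons_self ..)
        have htail : (PySem.List.pyRange (a+1) l 1).any
            (fun x => decide (x * x < l) && (PySem.Int.mod (l - 1) x == 0)
              && (chk co l x || chk co l (PySem.Int.floordiv (l - 1) x))) = false := by
          apply List.any_eq_false.mpr
          intro x hx
          have : x ∈ PySem.List.pyRange a l 1 := by
            rw [PySem.List.pyRange_one_cons hal]; exact List.mem_cons_of_mem _ hx
          simp [hfalse x this]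
        rw [List.any_cons, hhead, htail]
        simp [fLoop, h1]
      · push_neg at h1
        have hih := ih (a + 1) (by omega) (by omega)
        rw [List.any_cons, ← hih]
        by_cases hm : PySem.Int.mod (l - 1) a > 0
        · have hm0 : ¬ (PySem.Int.mod (l - 1) a == 0) = true := by
            simp; omega
          simp [fLoop, show ¬ a * a ≥ l by omega, hm, hm0]
        · have hmn : 0 ≤ PySem.Int.mod (l - 1) a := PySem.Int.mod_nonneg _ (by omega)
          have hm0 : PySem.Int.mod (l - 1) a = 0 := by omega
          by_cases hca : chk co l a = true
          · simp [fLoop, show ¬ a * a ≥ l by omega, hm, hm0, hca, h1]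
          · by_cases hcj : chk co l (PySem.Int.floordiv (l - 1) a) = true
            · simp [fLoop, show ¬ a * a ≥ l by omega, hm, hm0, hca, hcj, h1]
            · simp [fLoop, show ¬ a * a ≥ l by omega, hm, hm0, hca, hcj]
    · rw [PySem.List.pyRange_one_eq_nil (by omega)]
      rfl

-- the divisor 'any' over range(2, l) equals the key scan, once guard 3 is known false
theorem range_any_eq_key_any (co : List (Int × Int)) (l : Int) (hl : 2 < l)
    (h3 : ¬ (match dget co (l - 1) with
             | some v => v * (l - 1) == l - 1 | none => false) = true) :
    (PySem.List.pyRange 2 l 1).any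
        (fun x => decide (x * x < l) && (PySem.Int.mod (l - 1) x == 0)
          && (chk co l x || chk co l (PySem.Int.floordiv (l - 1) x)))
      = (co.map Prod.fst).any
          (fun k => decide (2 ≤ k) && (PySem.Int.mod (l - 1) k == 0) && chk co l k) := by
  have hguard : ∀ v : Int, dget co (l - 1) = some v → v * (l - 1) ≠ l - 1 := by
    intro v hv hc
    apply h3
    rw [hv]
    simpa using hc
  apply Bool.eq_iff_iff.mpr
  rw [List.any_eq_true, List.any_eq_true]
  constructor
  · rintro ⟨x, hx, hP⟩
    have hx' : 2 ≤ x ∧ x < l := (PySem.List.mem_pyRange_one).mp hx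
    simp only [Bool.and_eq_true, Bool.or_eq_true, decide_eq_true_eq, beq_iff_eq] at hP
    obtain ⟨⟨hxx, hmod⟩, hchk⟩ := hP
    have hdvd : x ∣ (l - 1) := (PySem.Int.mod_eq_zero_iff_dvd _ _).mp hmod
    obtain ⟨m, hme⟩ := hdvd
    have hx0 : 0 < x := by omega
    cases hchk with
    | inl hcx =>
      refine ⟨x, chk_mem hcx, ?_⟩
      simp [hx'.1, hmod, hcx]
    | inr hcj =>
      have hfd : PySem.Int.floordiv (l - 1) x = m := by
        rw [PySem.Int.floordiv_eq_ediv_of_pos hx0, hme, Int.mul_ediv_cancel_left _ (by omega)]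
      rw [hfd] at hcj
      have hxm : x ≤ m := by nlinarith
      have hmod' : PySem.Int.mod (l - 1) m = 0 :=
        (PySem.Int.mod_eq_zero_iff_dvd _ _).mpr ⟨x, by rw [hme]; ring⟩
      refine ⟨m, chk_mem hcj, ?_⟩
      simp [show 2 ≤ m by omega, hmod', hcj]
  · rintro ⟨k, hk, hP⟩
    simp only [Bool.and_eq_true, decide_eq_true_eq, beq_iff_eq] at hP
    obtain ⟨⟨hk2, hmod⟩, hchk⟩ := hP
    have hk0 : 0 < k := by omega
    have hdvd : k ∣ (l - 1) := (PySem.Int.mod_eq_zero_iff_dvd _ _).mp hmod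
    obtain ⟨m, hme⟩ := hdvd
    have hm1 : 1 ≤ m := by nlinarith
    have hmne : m ≠ 1 := by
      intro hm
      subst hm
      have hkl : k = l - 1 := by rw [mul_one] at hme; omega
      unfold chk at hchk
      cases hv : dget co k with
      | none => rw [hv] at hchk; simp at hchk
      | some v =>
        rw [hv] at hchk
        simp only [beq_iff_eq] at hchk
        exact hguard v (by rw [← hkl]; exact hv) (by rw [← hkl] at hchk ⊢; rw [mul_comm]; exact hchk)
    have hm2 : 2 ≤ m := by omega
    by_cases hkk : k * k < l
    · refine ⟨k, ?_, ?_⟩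
      · exact (PySem.List.mem_pyRange_one).mpr ⟨hk2, by nlinarith⟩
      · simp [hkk, hmod, hchk]
    · push_neg at hkk
      have hmk : m < k := by nlinarith
      have hmm : m * m < l := by nlinarith
      have hmod' : PySem.Int.mod (l - 1) m = 0 :=
        (PySem.Int.mod_eq_zero_iff_dvd _ _).mpr ⟨k, by rw [hme]; ring⟩
      have hfd : PySem.Int.floordiv (l - 1) m = k := by
        rw [PySem.Int.floordiv_eq_ediv_of_pos (by omega : (0:Int) < m), show l - 1 = m * k by rw [hme]; ring,
          Int.mul_ediv_cancel_left _ (by omega)]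
      refine ⟨m, ?_, ?_⟩
      · exact (PySem.List.mem_pyRange_one).mpr ⟨hm2, by nlinarith⟩
      · simp [hmm, hmod', hfd, hchk]

-- ===== VERDICT (by name: the statement is the Claim_ definition above) =====
theorem f_spec : Claim_equal_f := by
  unfold Claim_equal_f
  intro co c l _ _
  unfold Spec_f f f_alt
  by_cases h1 : (c == 1 && l == (dget co 1).getD 0) = true
  · simp [h1]
  · by_cases h2 : (!(dget co 1 == some 1)) = true
    · simp [h1, h2]
    · by_cases h3 : (match dget co (l - 1) with
          | some v => v * (l - 1) == l - 1 | none => false) = true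
      · simp [h1, h2, h3]
      · simp only [h1, h2, h3, if_neg, Bool.false_eq_true, not_false_eq_true, if_false]
        by_cases hl : l ≤ 2
        · rw [PySem.List.pyRange_one_eq_nil (by omega)]
          simp [fLoop, hl]
        · push_neg at hl
          rw [if_neg (by omega)]
          rw [fLoop_eq_any co l (l - 2).toNat 2 (by omega) (by omega)]
          exact range_any_eq_key_any co l hl h3
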